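-- pv_equiv track=rewrite | github.com/aaronjamt/AdventOfCode-2024 | day-7.py | int_to_operators_trinary
-- ===== SOURCE A (Python) =====
-- def int_to_operators_trinary(value, minimum_length=0):
-- 	# Convert to trinary, then to string of '*', '+', and '|'
-- 	result = ''
-- 	while value > 0:
-- 		digit = value % 3
-- 		result = ['*','+','|'][digit] + result
-- 		value = value // 3
--
-- 	if len(result) < minimum_length:
-- 		result = ('*' * (minimum_length-len(result))) + result
--
-- 	return result
-- ===== SOURCE B (Python) =====
-- def int_to_operators_trinary(value, minimum_length=0):
--     # Count the trinary digits of value (p becomes 3**n), then emit the symbols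
--     # most-significant-digit first by dividing a shrinking power of three.
--     n, p = 0, 1
--     while p <= value:
--         n += 1
--         p *= 3
--     s = ''
--     for _ in range(n):
--         p //= 3
--         s += '*+|'[value // p % 3]
--         value %= p
--     if minimum_length > n:
--         s = '*' * (minimum_length - n) + s
--     return s
-- ===== Notes on version B (the rewrite author's own statement) =====
-- stated objective: alternative
-- what changed: Instead of A's LSB-first while loop that prepends symbols and then pads, B first counts the trinary digits (growing a power of three), then emits the symbols most-significant-digit first by dividing a shrinking power of three, padding once at the end.
import Mathlib
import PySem

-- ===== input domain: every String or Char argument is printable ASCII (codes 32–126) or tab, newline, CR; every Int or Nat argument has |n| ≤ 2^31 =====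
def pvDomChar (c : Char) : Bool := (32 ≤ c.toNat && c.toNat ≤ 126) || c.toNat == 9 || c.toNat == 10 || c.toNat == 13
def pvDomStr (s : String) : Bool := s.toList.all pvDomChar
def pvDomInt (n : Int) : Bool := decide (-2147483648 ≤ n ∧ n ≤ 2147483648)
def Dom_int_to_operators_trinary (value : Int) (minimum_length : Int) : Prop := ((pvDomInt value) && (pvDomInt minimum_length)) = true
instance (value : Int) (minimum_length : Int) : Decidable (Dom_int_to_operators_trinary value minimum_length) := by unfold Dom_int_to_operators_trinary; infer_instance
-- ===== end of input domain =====

-- B counts the trinary digits first (growing a power of three) and then emits the symbols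
-- most-significant-digit first with a shrinking power, instead of A's LSB-first prepend loop;
-- alternative decomposition, same cost.

-- ===== PORT A =====
-- while value > 0: result = ['*','+','|'][value % 3] + result; value = value // 3
def pvLoopA (value : Int) (result : List Char) : List Char :=
  if value > 0 then
    pvLoopA (PySem.Int.floordiv value 3)
      (((PySem.List.pyGet? ['*','+','|'] (PySem.Int.mod value 3)).getD ' ') :: result)
  else result
termination_by value.toNat
decreasing_by
  have h3 : PySem.Int.floordiv value 3 = value / 3 :=
    PySem.Int.floordiv_eq_ediv_of_pos (by omega)
  simp only [h3]; omega

def int_to_operators_trinary (value : Int) (minimum_length : Int) : String :=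
  String.ofList
    (if (((pvLoopA value []).length : Int)) < minimum_length
      then List.replicate (minimum_length - ((pvLoopA value []).length : Int)).toNat '*'
            ++ pvLoopA value []
      else pvLoopA value [])

-- ===== PORT B =====
theorem pv_one_pos : (0:Int) < 1 := by norm_num

-- n, p = 0, 1; while p <= value: n += 1; p *= 3
def pvCountB (value : Int) (n : Int) (p : Int) (hp : 0 < p) : Int × Int :=
  if p ≤ value then pvCountB value (n + 1) (p * 3) (by omega) else (n, p)
termination_by (value + 1 - p).toNat
decreasing_by omega

-- for _ in range(n): p //= 3; s += '*+|'[value // p % 3]; value %= p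
def pvBuildB : Nat → Int → Int → List Char
  | 0, _, _ => []
  | Nat.succ k, value, p =>
      let p' := PySem.Int.floordiv p 3
      ((PySem.Str.pyGet? "*+|" (PySem.Int.mod (PySem.Int.floordiv value p') 3)).getD ' ')
        :: pvBuildB k (PySem.Int.mod value p') p'

def int_to_operators_trinary_alt (value : Int) (minimum_length : Int) : String :=
  String.ofList
    (if minimum_length > (pvCountB value 0 1 pv_one_pos).1
      then List.replicate (minimum_length - (pvCountB value 0 1 pv_one_pos).1).toNat '*'
            ++ pvBuildB (pvCountB value 0 1 pv_one_pos).1.toNat value (pvCountB value 0 1 pv_one_pos).2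
      else pvBuildB (pvCountB value 0 1 pv_one_pos).1.toNat value (pvCountB value 0 1 pv_one_pos).2)

-- ===== PRECONDITION & SPEC =====
def Spec_int_to_operators_trinary (value : Int) (minimum_length : Int) (out : String) : Prop := out = int_to_operators_trinary_alt value minimum_length
instance (value : Int) (minimum_length : Int) (out : String) : Decidable (Spec_int_to_operators_trinary value minimum_length out) := by unfold Spec_int_to_operators_trinary; infer_instance

-- ===== CLAIM =====
def Claim_equal_int_to_operators_trinary : Prop := ∀ (value : Int) (minimum_length : Int), Dom_int_to_operators_trinary value minimum_length → Spec_int_to_operators_trinary value minimum_length (int_to_operators_trinary value minimum_length)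

-- ===== LEMMAS AND PROOFS =====

-- the minimal trinary symbol string of v (MSB first), reference object for both ports
def pvDigits (v : Int) : List Char :=
  if v ≤ 0 then []
  else pvDigits (v / 3) ++ [(PySem.Str.pyGet? "*+|" (v % 3)).getD ' ']
termination_by v.toNat
decreasing_by omega

-- the two symbol tables agree
theorem pv_sym_eq (d : Int) :
    (PySem.List.pyGet? ['*','+','|'] d).getD ' ' = (PySem.Str.pyGet? "*+|" d).getD ' ' := by
  simp [PySem.Str.pyGet?]

-- A's accumulator loop computes pvDigits followed by the accumulator
theorem pvLoop_eq_digits (n : Nat) : ∀ v : Int, v.toNat ≤ n → ∀ acc : List Char,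
    pvLoopA v acc = pvDigits v ++ acc := by
  induction n with
  | zero =>
    intro v hv acc
    have h : ¬ v > 0 := by omega
    rw [pvLoopA, pvDigits]
    simp [h, show v ≤ 0 by omega]
  | succ n ih =>
    intro v hv acc
    by_cases h : v > 0
    · have h3 : PySem.Int.floordiv v 3 = v / 3 :=
        PySem.Int.floordiv_eq_ediv_of_pos (by omega)
      have hm : PySem.Int.mod v 3 = v % 3 :=
        PySem.Int.mod_eq_emod_of_pos (by omega)
      have hle : (v / 3).toNat ≤ n := by omega
      rw [pvLoopA, pvDigits]
      simp only [h, show ¬ v ≤ 0 by omega, if_true, if_false, h3, hm]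
      rw [ih _ hle, pv_sym_eq]
      simp
    · rw [pvLoopA, pvDigits]
      simp [h, show v ≤ 0 by omega]

-- v is below 3 ^ (number of its trinary digits)
theorem pv_lt_pow (n : Nat) : ∀ v : Int, v.toNat ≤ n → v < 3 ^ (pvDigits v).length := by
  induction n with
  | zero =>
    intro v hv
    rw [pvDigits]
    simp [show v ≤ 0 by omega]
    omega
  | succ n ih =>
    intro v hv
    by_cases h : v ≤ 0
    · rw [pvDigits]; simp [h]; omega
    · rw [pvDigits]
      simp only [h, if_false, List.length_append, List.length_cons, List.length_nil]
      have ih' := ih (v / 3) (by omega)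
      rw [show (pvDigits (v / 3)).length + (0 + 1) = (pvDigits (v / 3)).length + 1 from rfl,
        pow_succ]
      have hv3 : v = 3 * (v / 3) + v % 3 := by omega
      omega

-- the number of trinary digits is at most n when v < 3 ^ n
theorem pv_len_le (n : Nat) : ∀ v : Int, 0 ≤ v → v < 3 ^ n → (pvDigits v).length ≤ n := by
  induction n with
  | zero =>
    intro v h0 hlt
    have : v = 0 := by simp at hlt; omega
    subst this
    rw [pvDigits]; simp
  | succ n ih =>
    intro v h0 hlt
    by_cases h : v ≤ 0
    · rw [pvDigits]; simp [h]
    · rw [pvDigits]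
      simp only [h, if_false, List.length_append, List.length_cons, List.length_nil]
      have hdivlt : v / 3 < 3 ^ n := by
        rw [pow_succ] at hlt; omega
      have := ih (v / 3) (by omega) hdivlt
      omega

-- LSB peel of the MSB-first builder
theorem pvBuild_peel (n : Nat) : ∀ v : Int, 0 ≤ v →
    pvBuildB (n + 1) v (3 ^ (n + 1)) =
      pvBuildB n (v / 3) (3 ^ n) ++ [(PySem.Str.pyGet? "*+|" (v % 3)).getD ' '] := by
  induction n with
  | zero =>
    intro v hv
    simp only [pvBuildB]
    have h1 : PySem.Int.floordiv ((3:Int) ^ 1) 3 = 1 := by decide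
    rw [h1]
    have h2 : PySem.Int.floordiv v 1 = v := by
      rw [PySem.Int.floordiv_eq_ediv_of_pos (by omega)]; omega
    have h3 : PySem.Int.mod v 3 = v % 3 := PySem.Int.mod_eq_emod_of_pos (by omega)
    rw [h2, h3]
    simp
  | succ n ih =>
    intro v hv
    have hpow : (0:Int) < 3 ^ (n + 1) := by positivity
    have hfd : PySem.Int.floordiv ((3:Int) ^ (n + 2)) 3 = 3 ^ (n + 1) := by
      rw [PySem.Int.floordiv_eq_ediv_of_pos (by omega)]
      rw [show (3:Int) ^ (n + 2) = 3 ^ (n + 1) * 3 by ring]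
      exact Int.mul_ediv_cancel _ (by omega)
    have hfd' : PySem.Int.floordiv ((3:Int) ^ (n + 1)) 3 = 3 ^ n := by
      rw [PySem.Int.floordiv_eq_ediv_of_pos (by omega)]
      rw [show (3:Int) ^ (n + 1) = 3 ^ n * 3 by ring]
      exact Int.mul_ediv_cancel _ (by omega)
    show pvBuildB (n + 2) v (3 ^ (n + 2)) = _
    rw [pvBuildB]
    simp only [hfd]
    have hm1 : PySem.Int.mod v (3 ^ (n + 1)) = v % 3 ^ (n + 1) :=
      PySem.Int.mod_eq_emod_of_pos (by omega)
    have hd1 : PySem.Int.floordiv v (3 ^ (n + 1)) = v / 3 ^ (n + 1) :=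
      PySem.Int.floordiv_eq_ediv_of_pos (by omega)
    rw [hm1, hd1]
    rw [ih (v % 3 ^ (n + 1)) (Int.emod_nonneg v (by positivity))]
    have hA : (v % 3 ^ (n + 1)) % 3 = v % 3 :=
      Int.emod_emod_of_dvd v ⟨3 ^ n, by ring⟩
    have hB : v / 3 / 3 ^ n = v / 3 ^ (n + 1) := by
      rw [Int.ediv_ediv_of_nonneg (by norm_num : (0:Int) ≤ 3)]
      norm_num [pow_succ, mul_comm]
    have hC : (v % 3 ^ (n + 1)) / 3 = (v / 3) % 3 ^ n := by
      have e1 : v % 3 ^ (n + 1) = v - 3 ^ (n + 1) * (v / 3 ^ (n + 1)) := by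
        rw [Int.emod_def]
      have e2 : (v / 3) % 3 ^ n = v / 3 - 3 ^ n * (v / 3 / 3 ^ n) := by
        rw [Int.emod_def]
      rw [e1, e2, hB]
      rw [show v - 3 ^ (n + 1) * (v / 3 ^ (n + 1))
            = v + (-(3 ^ n * (v / 3 ^ (n + 1)))) * 3 by ring]
      rw [Int.add_mul_ediv_right _ _ (by norm_num : (3:Int) ≠ 0)]
      ring
    rw [hA, hC]
    conv_rhs => rw [pvBuildB]
    simp only [hfd']
    have hm2 : PySem.Int.mod (v / 3) (3 ^ n) = (v / 3) % 3 ^ n :=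
      PySem.Int.mod_eq_emod_of_pos (by positivity)
    have hd2 : PySem.Int.floordiv (v / 3) (3 ^ n) = v / 3 / 3 ^ n :=
      PySem.Int.floordiv_eq_ediv_of_pos (by positivity)
    rw [hm2, hd2, hB]
    simp

-- the builder produces pvDigits padded with '*' to n symbols
theorem pvBuild_eq (n : Nat) : ∀ v : Int, 0 ≤ v → v < 3 ^ n →
    pvBuildB n v (3 ^ n) =
      List.replicate (n - (pvDigits v).length) '*' ++ pvDigits v := by
  induction n with
  | zero =>
    intro v h0 hlt
    have : v = 0 := by simp at hlt; omega
    subst this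
    rw [pvDigits]
    simp [pvBuildB]
  | succ n ih =>
    intro v h0 hlt
    rw [pvBuild_peel n v h0]
    have hdivlt : v / 3 < 3 ^ n := by rw [pow_succ] at hlt; omega
    rw [ih (v / 3) (by omega) hdivlt]
    by_cases hz : v ≤ 0
    · have : v = 0 := by omega
      subst this
      have hd0 : pvDigits 0 = [] := by rw [pvDigits]; simp
      have hd0' : pvDigits ((0:Int) / 3) = [] := by norm_num [hd0]
      rw [hd0', hd0]
      simp [List.replicate_succ' (n := n)]
    · conv_rhs => rw [pvDigits]
      simp only [hz, if_false]
      have hlen : (pvDigits (v / 3)).length ≤ n :=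
        pv_len_le n (v / 3) (by omega) hdivlt
      have : n + 1 - ((pvDigits (v / 3)).length + 1) = n - (pvDigits (v / 3)).length := by omega
      simp [this]

-- the counter returns the digit count of v // p (plus n) and the matching power
theorem pvCount_eq (m : Nat) : ∀ (v n p : Int) (hp : 0 < p), (v + 1 - p).toNat ≤ m →
    pvCountB v n p hp =
      (n + ((pvDigits (v / p)).length : Int), p * 3 ^ (pvDigits (v / p)).length) := by
  induction m with
  | zero =>
    intro v n p hp hm
    have hlt : v < p := by omega
    rw [pvCountB]
    have hd : v / p ≤ 0 := by
      by_cases h0 : 0 ≤ v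
      · have : v / p < 1 := Int.ediv_lt_of_lt_mul hp (by simpa using hlt)
        omega
      · have := Int.ediv_le_ediv hp (show v ≤ 0 by omega)
        simpa using this
    have hdg : pvDigits (v / p) = [] := by rw [pvDigits]; simp [hd]
    simp [show ¬ p ≤ v by omega, hdg]
  | succ m ih =>
    intro v n p hp hm
    rw [pvCountB]
    by_cases h : p ≤ v
    · simp only [h, if_true]
      rw [ih v (n + 1) (p * 3) (by omega) (by omega)]
      have hq : 0 < v / p := by
        have := (Int.le_ediv_iff_mul_le (a := 1) (b := v) hp).mpr (by omega)
        omega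
      have hqd : pvDigits (v / p) =
          pvDigits (v / p / 3) ++ [(PySem.Str.pyGet? "*+|" ((v / p) % 3)).getD ' '] := by
        rw [pvDigits]; simp [show ¬ v / p ≤ 0 by omega]
      have hdd : v / p / 3 = v / (p * 3) := by
        rw [Int.ediv_ediv_of_nonneg (by omega : (0:Int) ≤ p)]
      rw [hqd, hdd]
      simp only [List.length_append, List.length_cons, List.length_nil, Prod.mk.injEq]
      constructor
      · push_cast; ring
      · rw [show (pvDigits (v / (p * 3))).length + (0 + 1)
              = (pvDigits (v / (p * 3))).length + 1 from rfl, pow_succ]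
        ring
    · have hd : v / p ≤ 0 := by
        by_cases h0 : 0 ≤ v
        · have : v / p < 1 := Int.ediv_lt_of_lt_mul hp (by simpa using (show v < p by omega))
          omega
        · have := Int.ediv_le_ediv hp (show v ≤ 0 by omega)
          simpa using this
      have hdg : pvDigits (v / p) = [] := by rw [pvDigits]; simp [hd]
      simp [h, hdg]

-- ===== VERDICT =====
theorem int_to_operators_trinary_spec : Claim_equal_int_to_operators_trinary := by
  intro value minimum_length _
  unfold Spec_int_to_operators_trinary int_to_operators_trinary int_to_operators_trinary_alt
  have hcount : pvCountB value 0 1 pv_one_pos =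
      (((pvDigits value).length : Int), 3 ^ (pvDigits value).length) := by
    have := pvCount_eq (value + 1 - 1).toNat value 0 1 (by norm_num) le_rfl
    simpa using this
  have hloop : pvLoopA value [] = pvDigits value := by
    simpa using pvLoop_eq_digits value.toNat value le_rfl []
  have hbuild : pvBuildB (pvCountB value 0 1 pv_one_pos).1.toNat value
      (pvCountB value 0 1 pv_one_pos).2 = pvDigits value := by
    rw [hcount]
    by_cases hv : value ≤ 0
    · have hd : pvDigits value = [] := by rw [pvDigits]; simp [hv]
      simp [hd, pvBuildB]
    · have hnn : (0:Int) ≤ value := by omega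
      have hlt : value < 3 ^ (pvDigits value).length :=
        pv_lt_pow value.toNat value le_rfl
      have := pvBuild_eq (pvDigits value).length value hnn hlt
      simpa using this
  rw [hloop, hbuild, hcount]
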